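-- pv_equiv track=rewrite | github.com/Tarundahiya7/MACS | backend/app/core/scheduler.py | build_cpu_series
-- ===== SOURCE A (Python) =====
-- from typing import Dict, List, Tuple, Optional, Any
-- import math
--
-- def build_cpu_series(timeline: List[Tuple[str, int, int]], total_time: int) -> List[Dict[str, int]]:
--     """
--     Produce per-integer time bucket occupancy (0 or 100).
--     Timeline segments are interpreted as half-open intervals [start, end).
--     `total_time` should be the simulation total time (max end).
--     """
--     if not timeline or total_time is None or total_time <= 0:
--         return []
--
--     T = int(math.ceil(total_time))
--     occupied = [False] * T
--
--     for pid, s, e in timeline: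
--         try:
--             start = float(s)
--             end = float(e)
--         except Exception:
--             continue
--         # ignore empty/invalid segments
--         if not (math.isfinite(start) and math.isfinite(end)) or end <= start:
--             continue
--
--         start_clamped = max(0.0, start)
--         end_clamped = min(float(T), end)
--
--         first_bucket = int(math.floor(start_clamped))
--         last_bucket_exclusive = int(math.ceil(end_clamped))
--
--         for tt in range(first_bucket, min(last_bucket_exclusive, T)):
--             if 0 <= tt < T:
--                 occupied[tt] = True
--
--     series = [{"time": t, "cpu": 100 if occupied[t] else 0} for t in range(0, T)]
--     return series
-- ===== SOURCE B (Python) =====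
-- from typing import List, Tuple, Dict
--
-- def build_cpu_series(timeline: List[Tuple[str, int, int]], total_time: int) -> List[Dict[str, int]]:
--     """Difference-array version: mark interval endpoints, prefix-sum to occupancy."""
--     if not timeline or total_time is None or total_time <= 0:
--         return []
--     T = int(total_time)
--     diff = [0] * (T + 1)
--     for _pid, s, e in timeline:
--         if e <= s:
--             continue
--         lo = max(0, min(s, T))
--         hi = max(0, min(e, T))
--         diff[lo] += 1
--         diff[hi] -= 1
--     series = []
--     cover = 0
--     for t in range(T):
--         cover += diff[t]
--         series.append({"time": t, "cpu": 100 if cover > 0 else 0})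
--     return series
-- ===== Notes on version B (the rewrite author's own statement) =====
-- stated objective: alternative
-- what changed: Replaces A's per-interval inner loop that marks every covered bucket in a boolean array by a difference array: each interval only bumps its two clamped endpoints, and a single prefix-sum pass over the buckets produces the occupancy (work per interval is O(1) instead of proportional to its length; measured cost on the benchmark family was similar).
import Mathlib
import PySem

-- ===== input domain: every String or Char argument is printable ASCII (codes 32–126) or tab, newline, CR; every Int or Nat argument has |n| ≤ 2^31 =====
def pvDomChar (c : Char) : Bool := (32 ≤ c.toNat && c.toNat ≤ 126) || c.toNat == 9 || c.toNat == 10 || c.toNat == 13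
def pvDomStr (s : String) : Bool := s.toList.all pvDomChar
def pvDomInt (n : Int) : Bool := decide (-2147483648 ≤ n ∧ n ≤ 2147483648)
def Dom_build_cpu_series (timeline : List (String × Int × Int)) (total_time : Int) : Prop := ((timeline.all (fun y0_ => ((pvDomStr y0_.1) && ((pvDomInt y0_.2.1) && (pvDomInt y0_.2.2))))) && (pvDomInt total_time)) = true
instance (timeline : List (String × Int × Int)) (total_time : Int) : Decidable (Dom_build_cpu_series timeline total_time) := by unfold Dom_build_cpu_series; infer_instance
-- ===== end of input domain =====

-- B replaces A's per-interval loop that marks every covered bucket by a difference array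
-- (bump the two clamped endpoints, then one prefix-sum pass): an alternative algorithm doing
-- O(1) work per interval instead of work proportional to the interval's length.

-- ===== PORT A =====
-- On Int inputs, Python's float(s)/float(e) never raise and are exact on |n| ≤ 2^31,
-- isfinite is always true, and floor/ceil of an integer-valued float are the identity,
-- so the try/except and the float detour reduce to the integer arithmetic below.
-- int(math.ceil(total_time)) = total_time for an int.
def pvMarkA (T : Int) (occ : List Bool) (tt : Int) : List Bool :=
  if 0 ≤ tt ∧ tt < T then occ.set tt.toNat true else occ

def pvStepA (T : Int) (occ : List Bool) (p : String × Int × Int) : List Bool :=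
  if p.2.2 ≤ p.2.1 then occ
  else
    let start_clamped := max 0 p.2.1
    let end_clamped := min T p.2.2
    (PySem.List.pyRange start_clamped (min end_clamped T) 1).foldl (pvMarkA T) occ

def build_cpu_series (timeline : List (String × Int × Int)) (total_time : Int) : List (List (String × Int)) :=
  if timeline = [] ∨ total_time ≤ 0 then []
  else
    let T : Int := total_time
    let occupied := timeline.foldl (pvStepA T) (List.replicate T.toNat false)
    (PySem.List.pyRange 0 T 1).map (fun t =>
      [("time", t), ("cpu", if occupied.getD t.toNat false then (100 : Int) else 0)])

-- ===== PORT B =====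
-- diff[i] += v
def pvBump (d : List Int) (i : Nat) (v : Int) : List Int := d.set i (d.getD i 0 + v)

def pvStepB (T : Int) (d : List Int) (p : String × Int × Int) : List Int :=
  if p.2.2 ≤ p.2.1 then d
  else pvBump (pvBump d (max 0 (min p.2.1 T)).toNat 1) (max 0 (min p.2.2 T)).toNat (-1)

def pvEmitB (diff : List Int) (st : Int × List (List (String × Int))) (t : Int) :
    Int × List (List (String × Int)) :=
  let cover := st.1 + diff.getD t.toNat 0
  (cover, st.2 ++ [[("time", t), ("cpu", if 0 < cover then (100 : Int) else 0)]])

def build_cpu_series_alt (timeline : List (String × Int × Int)) (total_time : Int) : List (List (String × Int)) :=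
  if timeline = [] ∨ total_time ≤ 0 then []
  else
    let T : Int := total_time
    let diff := timeline.foldl (pvStepB T) (List.replicate (T.toNat + 1) 0)
    ((PySem.List.pyRange 0 T 1).foldl (pvEmitB diff) (0, [])).2

-- ===== PRECONDITION & SPEC =====
def Spec_build_cpu_series (timeline : List (String × Int × Int)) (total_time : Int) (out : List (List (String × Int))) : Prop := out = build_cpu_series_alt timeline total_time
instance (timeline : List (String × Int × Int)) (total_time : Int) (out : List (List (String × Int))) : Decidable (Spec_build_cpu_series timeline total_time out) := by unfold Spec_build_cpu_series; infer_instance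

-- ===== CLAIM (what is proved, stated in full; the proofs are below) =====
def Claim_equal_build_cpu_series : Prop := ∀ (timeline : List (String × Int × Int)) (total_time : Int), Dom_build_cpu_series timeline total_time → Spec_build_cpu_series timeline total_time (build_cpu_series timeline total_time)

-- ===== LEMMAS AND PROOFS =====

-- "interval p covers bucket j" (with both endpoints clamped to [0, T])
def pvCov (T j : Int) (p : String × Int × Int) : Bool :=
  decide (p.2.1 < p.2.2 ∧ max 0 (min p.2.1 T) ≤ j ∧ j < max 0 (min p.2.2 T))

theorem pv_getD_set {α} (l : List α) (i j : Nat) (x d : α) :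
    (l.set i x).getD j d = if i = j ∧ j < l.length then x else l.getD j d := by
  simp only [List.getD_eq_getElem?_getD, List.getElem?_set]
  by_cases hij : i = j
  · subst hij
    by_cases hl : i < l.length <;> simp [hl]
  · simp [hij]

theorem pv_len_markfold (T : Int) : ∀ (r : List Int) (occ : List Bool),
    (r.foldl (pvMarkA T) occ).length = occ.length := by
  intro r
  induction r with
  | nil => intro occ; rfl
  | cons a r ih =>
      intro occ
      simp only [List.foldl_cons, ih]
      unfold pvMarkA
      split <;> simp

theorem pv_markRange_getD (T : Int) :
    ∀ (n : Nat) (a b : Int) (occ : List Bool) (j : Nat),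
      (b - a).toNat = n → occ.length = T.toNat → 0 ≤ a → b ≤ T →
      ((PySem.List.pyRange a b 1).foldl (pvMarkA T) occ).getD j false
        = (occ.getD j false || decide (a ≤ (j : Int) ∧ (j : Int) < b)) := by
  intro n
  induction n with
  | zero =>
      intro a b occ j hn hlen ha hb
      have hba : b ≤ a := by omega
      rw [PySem.List.pyRange_one_eq_nil hba]
      have : ¬ (a ≤ (j : Int) ∧ (j : Int) < b) := by omega
      simp [this]
  | succ n ih =>
      intro a b occ j hn hlen ha hb
      have hab : a < b := by omega
      rw [PySem.List.pyRange_one_cons hab, List.foldl_cons]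
      rw [ih (a + 1) b (pvMarkA T occ a) j (by omega)
            (by unfold pvMarkA; split <;> simp [hlen]) (by omega) hb]
      have hg : 0 ≤ a ∧ a < T := by omega
      unfold pvMarkA
      rw [if_pos hg, pv_getD_set]
      by_cases hc : a.toNat = j ∧ j < occ.length
      · have hj : (j : Int) = a := by omega
        have h1 : (a ≤ (j : Int) ∧ (j : Int) < b) := by omega
        simp [hc, h1]
      · rw [if_neg hc]
        congr 1
        rcases Nat.lt_or_ge j T.toNat with hjT | hjT
        · have hne : (j : Int) ≠ a := by omega
          simp only [decide_eq_decide]; omega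
        · simp only [decide_eq_decide]
          omega

theorem pv_len_stepA (T : Int) (occ : List Bool) (p : String × Int × Int) :
    (pvStepA T occ p).length = occ.length := by
  unfold pvStepA
  split
  · rfl
  · exact pv_len_markfold T _ occ

theorem pv_stepA_getD (T : Int) (hT : 0 < T) (occ : List Bool) (p : String × Int × Int)
    (j : Nat) (hlen : occ.length = T.toNat) :
    (pvStepA T occ p).getD j false = (occ.getD j false || pvCov T (j : Int) p) := by
  obtain ⟨pid, s, e⟩ := p
  unfold pvStepA pvCov
  by_cases hse : e ≤ s
  · simp [hse]
  · rw [if_neg hse]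
    rw [pv_markRange_getD T ((min (min T e) T) - max 0 s).toNat (max 0 s) (min (min T e) T)
          occ j rfl hlen (by omega) (by omega)]
    congr 1
    simp only [decide_eq_decide]
    omega

theorem pv_foldA_getD (T : Int) (hT : 0 < T) :
    ∀ (tl : List (String × Int × Int)) (occ : List Bool) (j : Nat),
      occ.length = T.toNat →
      (tl.foldl (pvStepA T) occ).getD j false = (occ.getD j false || tl.any (pvCov T (j : Int))) := by
  intro tl
  induction tl with
  | nil => intro occ j _; simp
  | cons p tl ih =>
      intro occ j hlen
      simp only [List.foldl_cons, List.any_cons]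
      rw [ih (pvStepA T occ p) j (by rw [pv_len_stepA, hlen]),
          pv_stepA_getD T hT occ p j hlen, Bool.or_assoc]

-- sum of the first n+1 entries grows by getD n (unconditionally: past the end getD is 0)
theorem pv_take_succ_sum (d : List Int) (n : Nat) :
    (d.take (n + 1)).sum = (d.take n).sum + d.getD n 0 := by
  rw [List.take_add_one, List.getD_eq_getElem?_getD, List.sum_append]
  cases hn : d[n]? <;> simp

theorem pv_sum_set (l : List Int) : ∀ (i : Nat) (x : Int), i < l.length →
    (l.set i x).sum = l.sum - l.getD i 0 + x := by
  induction l with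
  | nil => intro i x h; simp at h
  | cons a l ih =>
      intro i x h
      cases i with
      | zero => simp [List.getD]; ring
      | succ i =>
          simp only [List.set_cons_succ, List.sum_cons, List.getD_cons_succ]
          rw [ih i x (by simpa using h)]
          ring

theorem pv_csum_bump (d : List Int) (i j : Nat) (v : Int) :
    ((pvBump d i v).take (j + 1)).sum
      = (d.take (j + 1)).sum + if i ≤ j ∧ i < d.length then v else 0 := by
  unfold pvBump
  rw [List.take_set]
  by_cases hc : i ≤ j ∧ i < d.length
  · have hlen : i < (d.take (j + 1)).length := by simp; omega
    rw [pv_sum_set _ i _ hlen, if_pos hc]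
    have hlt : i < j + 1 := by omega
    have : (d.take (j + 1)).getD i 0 = d.getD i 0 := by
      rw [List.getD_eq_getElem?_getD, List.getD_eq_getElem?_getD, List.getElem?_take_of_lt hlt]
    rw [this]; ring
  · have hge : (d.take (j + 1)).length ≤ i := by simp; omega
    rw [List.set_eq_of_length_le hge, if_neg hc]; ring

theorem pv_len_bump (d : List Int) (i : Nat) (v : Int) : (pvBump d i v).length = d.length := by
  unfold pvBump; simp

theorem pv_csum_foldB (T : Int) (hT : 0 < T) :
    ∀ (tl : List (String × Int × Int)) (d : List Int) (j : Nat),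
      d.length = T.toNat + 1 → j < T.toNat →
      ((tl.foldl (pvStepB T) d).take (j + 1)).sum
        = (d.take (j + 1)).sum + (tl.countP (pvCov T (j : Int)) : Int) := by
  intro tl
  induction tl with
  | nil => intro d j _ _; simp
  | cons p tl ih =>
      intro d j hlen hj
      obtain ⟨pid, s, e⟩ := p
      simp only [List.foldl_cons, List.countP_cons]
      rw [ih (pvStepB T d (pid, s, e)) j (by
            unfold pvStepB
            split
            · exact hlen
            · rw [pv_len_bump, pv_len_bump]; exact hlen) hj]
      unfold pvStepB pvCov
      by_cases hse : e ≤ s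
      · simp [hse]
      · rw [if_neg hse]
        rw [pv_csum_bump, pv_csum_bump, pv_len_bump]
        have hlo : (max 0 (min s T)).toNat < d.length := by omega
        have hhi : (max 0 (min e T)).toNat < d.length := by omega
        have hcov : decide (s < e ∧ max 0 (min s T) ≤ (j : Int) ∧ (j : Int) < max 0 (min e T))
            = decide ((max 0 (min s T)).toNat ≤ j ∧ ¬ (max 0 (min e T)).toNat ≤ j) := by
          simp only [decide_eq_decide]; omega
        rw [hcov]
        by_cases h1 : (max 0 (min s T)).toNat ≤ j <;> by_cases h2 : (max 0 (min e T)).toNat ≤ j <;>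
          simp [h1, h2, hlo, hhi] <;> omega

theorem pv_emitB (diff : List Int) (T : Int) :
    ∀ (n : Nat) (k : Int) (acc : List (List (String × Int))),
      0 ≤ k → (T - k).toNat = n →
      ((PySem.List.pyRange k T 1).foldl (pvEmitB diff) ((diff.take k.toNat).sum, acc)).2
        = acc ++ (PySem.List.pyRange k T 1).map (fun t =>
            [("time", t), ("cpu", if 0 < (diff.take (t.toNat + 1)).sum then (100 : Int) else 0)]) := by
  intro n
  induction n with
  | zero =>
      intro k acc hk hn
      rw [PySem.List.pyRange_one_eq_nil (by omega)]
      simp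
  | succ n ih =>
      intro k acc hk hn
      have hkT : k < T := by omega
      rw [PySem.List.pyRange_one_cons hkT, List.foldl_cons]
      have hcover : (diff.take k.toNat).sum + diff.getD k.toNat 0 = (diff.take (k.toNat + 1)).sum :=
        (pv_take_succ_sum diff k.toNat).symm
      have hk1 : (k + 1).toNat = k.toNat + 1 := by omega
      have hstep : pvEmitB diff ((diff.take k.toNat).sum, acc) k
          = ((diff.take ((k+1).toNat)).sum,
             acc ++ [[("time", k), ("cpu", if 0 < (diff.take (k.toNat + 1)).sum then (100 : Int) else 0)]]) := by
        unfold pvEmitB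
        simp only [hk1, hcover]
      rw [hstep, ih (k + 1) _ (by omega) (by omega)]
      simp

-- ===== VERDICT (by name: the statement is the Claim_ definition above) =====
theorem build_cpu_series_spec : Claim_equal_build_cpu_series := by
  intro timeline total_time _
  unfold Spec_build_cpu_series build_cpu_series build_cpu_series_alt
  by_cases h : timeline = [] ∨ total_time ≤ 0
  · simp [h]
  · rw [if_neg h, if_neg h]
    have hT : 0 < total_time := by
      rcases not_or.mp h with ⟨_, h2⟩; omega
    set T := total_time with hTdef
    have hstart : ((0 : Int), ([] : List (List (String × Int))))
        = (((timeline.foldl (pvStepB T) (List.replicate (T.toNat + 1) 0)).take (0:Int).toNat).sum, []) := by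
      simp
    rw [hstart, pv_emitB _ T (T - 0).toNat 0 [] le_rfl rfl]
    rw [List.nil_append]
    apply List.map_congr_left
    intro t ht
    rw [PySem.List.mem_pyRange_one] at ht
    have htn : ((t.toNat : Int)) = t := by omega
    have hjT : t.toNat < T.toNat := by omega
    rw [pv_foldA_getD T hT timeline _ t.toNat (by simp),
        pv_csum_foldB T hT timeline _ t.toNat (by simp) hjT]
    have hrep0 : ((List.replicate (T.toNat + 1) (0:Int)).take (t.toNat + 1)).sum = 0 := by
      simp [List.take_replicate]
    have hrepF : (List.replicate T.toNat false).getD t.toNat false = false := by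
      rw [List.getD_eq_getElem?_getD, List.getElem?_replicate]
      simp [hjT]
    rw [hrep0, hrepF, htn, Bool.false_or, zero_add]
    congr 1
    by_cases hc : timeline.any (pvCov T t) = true
    · rw [if_pos hc]
      rw [List.any_eq_true] at hc
      obtain ⟨x, hx, hpx⟩ := hc
      have : 0 < timeline.countP (pvCov T t) := List.countP_pos_iff.mpr ⟨x, hx, hpx⟩
      rw [if_pos (by exact_mod_cast this)]
    · rw [if_neg hc]
      have : ¬ 0 < timeline.countP (pvCov T t) := by
        intro hpos
        exact hc (List.any_eq_true.mpr (List.countP_pos_iff.mp hpos))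
      rw [if_neg (by exact_mod_cast this)]
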